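-- pv_equiv track=rewrite | github.com/RosettaCommons/tools | python_cc_reader/python_cc_reader/inclusion_removal/add_headers.py | group_and_sort_headers
-- ===== SOURCE A (Python) =====
-- def group_headers(headers):
--
--     # order should be: core, protocols, devel, apps,
--     # utility, numeric, ObjexxFCL, STL, everything else
--     lib_names = [
--         "platform",
--         "core",
--         "protocols",
--         "devel",
--         "apps",
--         "utility",
--         "numeric",
--         "ObjexxFCL",
--     ]
--     other_names = ["stl", "other"]
--     header_sets = {}
--     for name in lib_names:
--         header_sets[name] = {}
--     for name in other_names:
--         header_sets[name] = []
--     for h in headers: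
--         if len(h.split("/")) > 1:
--             libname = h.split("/")[0]
--             if libname in lib_names:
--                 nsname = h[0 : h.rfind("/")]
--                 if nsname not in header_sets[libname]:
--                     header_sets[libname][nsname] = []
--                 header_sets[libname][nsname].append(h)
--             else:
--                 header_sets["other"].append(h)
--         else:
--             header_sets["stl"].append(h)
--     for libname in lib_names:
--         for nsname in header_sets[libname]:
--             header_sets[libname][nsname].sort()
--     for name in other_names:
--         header_sets[name].sort()
--     return lib_names, other_names, header_sets
--
-- def group_and_sort_headers(headers):
--     lib_names, other_names, header_sets = group_headers(headers)
--     all_headers = []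
--     for libname in lib_names:
--         namespaces = list(header_sets[libname].keys())
--         namespaces.sort()
--         for ns in namespaces:
--             # print libname, ns
--             all_headers.extend(header_sets[libname][ns])
--     for name in other_names:
--         all_headers.extend(header_sets[name])
--     return all_headers
-- ===== SOURCE B (Python) =====
-- def group_and_sort_headers(headers):
--     # One pass: classify each header into a flat per-library list (plus stl/other),
--     # then one composite-key sort (namespace, header) per library replaces the
--     # nested namespace dictionary and its separate namespace sort.
--     lib_names = [
--         "platform",
--         "core",
--         "protocols",
--         "devel",
--         "apps",
--         "utility",
--         "numeric",
--         "ObjexxFCL",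
--     ]
--     groups = {name: [] for name in lib_names}
--     stl = []
--     other = []
--     for h in headers:
--         parts = h.split("/")
--         if len(parts) > 1:
--             if parts[0] in groups:
--                 groups[parts[0]].append(h)
--             else:
--                 other.append(h)
--         else:
--             stl.append(h)
--     out = []
--     for name in lib_names:
--         out.extend(sorted(groups[name], key=lambda h: (h[: h.rfind("/")], h)))
--     out.extend(sorted(stl))
--     out.extend(sorted(other))
--     return out
-- ===== Notes on version B (the rewrite author's own statement) =====
-- stated objective: simpler
-- what changed: Replaces the nested per-library namespace dictionary (group by namespace, sort each bucket, sort the namespace keys, concatenate) with flat per-library lists and a single stable sort per library under the composite key (namespace, header), keeping the stl/other tails.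
import Mathlib
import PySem

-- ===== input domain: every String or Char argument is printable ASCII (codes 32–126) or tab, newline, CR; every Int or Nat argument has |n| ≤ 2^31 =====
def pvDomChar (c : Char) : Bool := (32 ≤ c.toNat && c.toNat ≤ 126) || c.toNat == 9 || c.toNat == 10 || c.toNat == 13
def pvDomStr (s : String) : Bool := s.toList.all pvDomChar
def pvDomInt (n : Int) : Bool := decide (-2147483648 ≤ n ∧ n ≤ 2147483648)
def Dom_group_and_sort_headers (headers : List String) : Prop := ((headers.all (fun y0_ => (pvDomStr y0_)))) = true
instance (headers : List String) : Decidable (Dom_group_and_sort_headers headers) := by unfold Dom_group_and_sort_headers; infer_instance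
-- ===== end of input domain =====

-- B replaces A's nested per-library namespace dictionary (+ per-bucket sorts + namespace-key sort)
-- with flat per-library lists and ONE stable composite-key sort (namespace, header) per library: simpler.

-- ===== PORT A =====
-- shared small helpers for Python expressions used by both programs:
-- h.split("/")  (sep "/" ≠ "", so split? is always `some`)
def pvParts (h : String) : List String := (PySem.Str.split? h "/").getD []
-- h[0 : h.rfind("/")]
def pvNs (h : String) : String := PySem.Str.slice h (some 0) (some (PySem.Str.rfind h "/"))

def pvLibNames : List String :=
  ["platform", "core", "protocols", "devel", "apps", "utility", "numeric", "ObjexxFCL"]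

-- `header_sets[libname][nsname].append(h)` (nsname = pvNs h, present in d)
def pvAppendNs (d : PySem.Dict String (List String)) (h : String) : PySem.Dict String (List String) :=
  d.insert (pvNs h) ((d.get? (pvNs h)).getD [] ++ [h])

-- the inner block of A's classification loop: ensure the namespace key exists, then append h
def pvStepNsA (d : PySem.Dict String (List String)) (h : String) : PySem.Dict String (List String) :=
  pvAppendNs (if d.contains (pvNs h) then d else d.insert (pvNs h) []) h

-- one iteration of A's `for h in headers` loop; state = (lib part of header_sets, stl list, other list)
-- (Python's header_sets maps lib names to dicts and "stl"/"other" to lists; being heterogeneous it is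
-- split by value type: the Dict for the lib entries plus the two lists)
def pvStepA (st : PySem.Dict String (PySem.Dict String (List String)) × List String × List String)
    (h : String) : PySem.Dict String (PySem.Dict String (List String)) × List String × List String :=
  if 1 < (pvParts h).length then
    -- h.split("/")[0]; split is nonempty, so [0] is its head
    if (pvParts h).headD "" ∈ pvLibNames then
      (st.1.insert ((pvParts h).headD "")
        (pvStepNsA ((st.1.get? ((pvParts h).headD "")).getD PySem.Dict.empty) h), st.2.1, st.2.2)
    else
      (st.1, st.2.1, st.2.2 ++ [h])
  else
    (st.1, st.2.1 ++ [h], st.2.2)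

-- `for nsname in header_sets[libname]: header_sets[libname][nsname].sort()`
def pvSortInner (d : PySem.Dict String (List String)) : PySem.Dict String (List String) :=
  d.keys.foldl (fun d ns => d.insert ns (PySem.List.sorted (d.getD ns []) (fun x => x) false)) d

def pvGroupHeaders (headers : List String) :
    List String × List String ×
      (PySem.Dict String (PySem.Dict String (List String)) × List String × List String) :=
  let lib_names := pvLibNames
  let other_names := ["stl", "other"]
  let st := headers.foldl pvStepA
    (lib_names.foldl (fun d name => d.insert name PySem.Dict.empty) PySem.Dict.empty, ([], []))
  let outer := lib_names.foldl
    (fun o libname => o.insert libname (pvSortInner ((o.get? libname).getD PySem.Dict.empty))) st.1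
  (lib_names, other_names,
    (outer, PySem.List.sorted st.2.1 (fun x => x) false, PySem.List.sorted st.2.2 (fun x => x) false))

def group_and_sort_headers (headers : List String) : List String :=
  let r := pvGroupHeaders headers
  let lib_names := r.1
  let header_sets := r.2.2
  let all1 := lib_names.foldl (fun acc libname =>
      let inner := (header_sets.1.get? libname).getD PySem.Dict.empty
      let namespaces := PySem.List.sorted inner.keys (fun x => x) false
      namespaces.foldl (fun acc ns => acc ++ inner.getD ns []) acc) []
  (all1 ++ header_sets.2.1) ++ header_sets.2.2

-- ===== PORT B =====
-- one iteration of B's single classification loop; state = (per-library flat lists, stl, other)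
def pvStepB (st : PySem.Dict String (List String) × List String × List String)
    (h : String) : PySem.Dict String (List String) × List String × List String :=
  if 1 < (pvParts h).length then
    if st.1.contains ((pvParts h).headD "") then
      (st.1.insert ((pvParts h).headD "") (st.1.getD ((pvParts h).headD "") [] ++ [h]), st.2.1, st.2.2)
    else
      (st.1, st.2.1, st.2.2 ++ [h])
  else
    (st.1, st.2.1 ++ [h], st.2.2)

def group_and_sort_headers_alt (headers : List String) : List String :=
  let groups0 : PySem.Dict String (List String) :=
    pvLibNames.foldl (fun d name => d.insert name []) PySem.Dict.empty
  let st := headers.foldl pvStepB (groups0, ([], []))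
  let out := pvLibNames.foldl
    (fun acc name => acc ++ PySem.List.sorted2 (st.1.getD name []) pvNs (fun x => x) false) []
  (out ++ PySem.List.sorted st.2.1 (fun x => x) false) ++ PySem.List.sorted st.2.2 (fun x => x) false

-- ===== PRECONDITION & SPEC =====
def Spec_group_and_sort_headers (headers : List String) (out : List String) : Prop := out = group_and_sort_headers_alt headers
instance (headers : List String) (out : List String) : Decidable (Spec_group_and_sort_headers headers out) := by unfold Spec_group_and_sort_headers; infer_instance

-- ===== CLAIM (what is proved, stated in full; the proofs are below) =====
def Claim_equal_group_and_sort_headers : Prop := ∀ (headers : List String), Dom_group_and_sort_headers headers → Spec_group_and_sort_headers headers (group_and_sort_headers headers)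

-- ===== LEMMAS AND PROOFS =====

-- the classification predicates (proof-side only)
def pvIsLib (name h : String) : Bool := decide (1 < (pvParts h).length) && decide ((pvParts h).headD "" = name)
def pvIsStl (h : String) : Bool := !decide (1 < (pvParts h).length)
def pvIsOther (h : String) : Bool := decide (1 < (pvParts h).length) && !decide ((pvParts h).headD "" ∈ pvLibNames)

theorem isStl_t {h : String} (hl : ¬ 1 < (pvParts h).length) : pvIsStl h = true := by
  unfold pvIsStl; rw [decide_eq_false hl]; rfl
theorem isStl_f {h : String} (hl : 1 < (pvParts h).length) : pvIsStl h = false := by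
  unfold pvIsStl; rw [decide_eq_true hl]; rfl
theorem isOther_t {h : String} (hl : 1 < (pvParts h).length)
    (hm : (pvParts h).headD "" ∉ pvLibNames) : pvIsOther h = true := by
  unfold pvIsOther; rw [decide_eq_true hl, decide_eq_false hm]; rfl
theorem isOther_f_mem {h : String} (hm : (pvParts h).headD "" ∈ pvLibNames) : pvIsOther h = false := by
  unfold pvIsOther; rw [decide_eq_true hm]; simp
theorem isOther_f_len {h : String} (hl : ¬ 1 < (pvParts h).length) : pvIsOther h = false := by
  unfold pvIsOther; rw [decide_eq_false hl]; rfl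
theorem isLib_t {name h : String} (hl : 1 < (pvParts h).length)
    (hn : (pvParts h).headD "" = name) : pvIsLib name h = true := by
  unfold pvIsLib; rw [decide_eq_true hl, decide_eq_true hn]; rfl
theorem isLib_f_head {name h : String} (hn : ¬ (pvParts h).headD "" = name) : pvIsLib name h = false := by
  unfold pvIsLib; rw [decide_eq_false hn]; simp
theorem isLib_f_len {name h : String} (hl : ¬ 1 < (pvParts h).length) : pvIsLib name h = false := by
  unfold pvIsLib; rw [decide_eq_false hl]; rfl

-- the strict "before" relation of sorted2 under the key (pvNs h, h)
def pvBefore (a b : String) : Bool :=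
  decide (pvNs a < pvNs b) || (!decide (pvNs b < pvNs a) && decide (a < b))
-- its reflexive complement: the order the output lists satisfy
def pvR (a b : String) : Prop := pvBefore b a = false

theorem pvBefore_eq_false_iff (a b : String) :
    pvBefore a b = false ↔ ¬ pvNs a < pvNs b ∧ (pvNs b < pvNs a ∨ ¬ a < b) := by
  unfold pvBefore
  simp only [Bool.or_eq_false_iff, Bool.and_eq_false_iff, Bool.not_eq_false',
    decide_eq_false_iff_not, decide_eq_true_eq]

theorem pvBefore_eq_true_iff (a b : String) :
    pvBefore a b = true ↔ pvNs a < pvNs b ∨ (¬ pvNs b < pvNs a ∧ a < b) := by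
  unfold pvBefore
  simp only [Bool.or_eq_true, Bool.and_eq_true, Bool.not_eq_true', decide_eq_true_eq,
    decide_eq_false_iff_not]

theorem pvR_iff (a b : String) : pvR a b ↔ pvNs a < pvNs b ∨ (pvNs a = pvNs b ∧ a ≤ b) := by
  unfold pvR
  rw [pvBefore_eq_false_iff]
  constructor
  · rintro ⟨h1, h2 | h2⟩
    · exact Or.inl h2
    · by_cases h3 : pvNs a < pvNs b
      · exact Or.inl h3
      · exact Or.inr ⟨le_antisymm (not_lt.mp h1) (not_lt.mp h3), not_lt.mp h2⟩
  · rintro (h | ⟨h, h'⟩)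
    · exact ⟨not_lt_of_gt h, Or.inl h⟩
    · exact ⟨by rw [h]; exact lt_irrefl _, Or.inr (not_lt.mpr h')⟩

theorem pvR_antisymm {a b : String} (h1 : pvR a b) (h2 : pvR b a) : a = b := by
  rw [pvR_iff] at h1 h2
  rcases h1 with h1 | ⟨h1, h1'⟩ <;> rcases h2 with h2 | ⟨h2, h2'⟩
  · exact absurd h2 (lt_asymm h1)
  · exact absurd h2 (ne_of_gt h1)
  · exact absurd h1 (ne_of_gt h2)
  · exact le_antisymm h1' h2'

theorem pvBefore_asymm {a b : String} (h : pvBefore a b = true) : pvBefore b a = false := by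
  rw [pvBefore_eq_true_iff] at h
  rw [pvBefore_eq_false_iff]
  rcases h with h | ⟨h, h'⟩
  · exact ⟨lt_asymm h, Or.inl h⟩
  · exact ⟨h, Or.inr (lt_asymm h')⟩

theorem pvBefore_trans {a b c : String} (h1 : pvBefore a b = true) (h2 : pvBefore b c = true) :
    pvBefore a c = true := by
  rw [pvBefore_eq_true_iff] at h1 h2 ⊢
  rcases h1 with h1 | ⟨h1, h1'⟩ <;> rcases h2 with h2 | ⟨h2, h2'⟩
  · exact Or.inl (lt_trans h1 h2)
  · exact Or.inl (lt_of_lt_of_le h1 (not_lt.mp h2))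
  · exact Or.inl (lt_of_le_of_lt (not_lt.mp h1) h2)
  · exact Or.inr ⟨not_lt.mpr (le_trans (not_lt.mp h1) (not_lt.mp h2)), lt_trans h1' h2'⟩

theorem pairwise_insertBy {l : List String} (x : String) (h : l.Pairwise pvR) :
    (PySem.List.insertBy pvBefore x l).Pairwise pvR := by
  induction l with
  | nil => simp [PySem.List.insertBy]
  | cons y ys ih =>
    rw [List.pairwise_cons] at h
    show List.Pairwise pvR (if pvBefore x y = true then x :: y :: ys else y :: PySem.List.insertBy pvBefore x ys)
    by_cases hxy : pvBefore x y = true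
    · rw [if_pos hxy]
      refine List.Pairwise.cons ?_ (List.Pairwise.cons h.1 h.2)
      intro z hz
      rcases List.mem_cons.mp hz with rfl | hz
      · exact pvBefore_asymm hxy
      · by_contra hb
        have hzx : pvBefore z x = true := by
          cases hzx : pvBefore z x
          · exact absurd hzx hb
          · rfl
        have hzy : pvBefore z y = true := pvBefore_trans hzx hxy
        have hzy' := h.1 z hz
        rw [pvR] at hzy'
        rw [hzy'] at hzy
        exact absurd hzy (by simp)
    · rw [if_neg hxy]
      refine List.Pairwise.cons ?_ (ih h.2)
      intro z hz
      rcases (PySem.List.mem_insertBy pvBefore x z ys).mp hz with rfl | hz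
      · show pvBefore z y = false
        cases hv : pvBefore z y
        · rfl
        · exact absurd hv hxy
      · exact h.1 z hz

theorem pairwise_foldl_insertBy (xs : List String) (l : List String) (h : l.Pairwise pvR) :
    (xs.foldl (fun acc x => PySem.List.insertBy pvBefore x acc) l).Pairwise pvR := by
  induction xs generalizing l with
  | nil => exact h
  | cons x xs ih => exact ih _ (pairwise_insertBy x h)

theorem sorted2_eq_foldl (xs : List String) :
    PySem.List.sorted2 xs pvNs (fun x => x) false =
      xs.foldl (fun acc x => PySem.List.insertBy pvBefore x acc) [] := rfl

theorem sorted2_pairwise (xs : List String) :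
    (PySem.List.sorted2 xs pvNs (fun x => x) false).Pairwise pvR := by
  rw [sorted2_eq_foldl]; exact pairwise_foldl_insertBy xs [] List.Pairwise.nil

-- two pairwise-pvR permutations of each other are equal
theorem pvR_uniq : ∀ (l1 l2 : List String), l1.Perm l2 → l1.Pairwise pvR → l2.Pairwise pvR → l1 = l2 := by
  intro l1
  induction l1 with
  | nil => intro l2 hp _ _; exact (hp.symm.eq_nil).symm
  | cons a t1 ih =>
    intro l2 hp h1 h2
    cases l2 with
    | nil => exact absurd hp.eq_nil (by simp)
    | cons b t2 =>
      by_cases hab : a = b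
      · subst hab
        have := ih t2 (hp.cons_inv) (List.pairwise_cons.mp h1).2 (List.pairwise_cons.mp h2).2
        rw [this]
      · exfalso
        have ha2 : a ∈ b :: t2 := hp.subset (by simp)
        have hb1 : b ∈ a :: t1 := hp.symm.subset (by simp)
        have ha : a ∈ t2 := by
          rcases List.mem_cons.mp ha2 with h | h
          · exact absurd h hab
          · exact h
        have hb : b ∈ t1 := by
          rcases List.mem_cons.mp hb1 with h | h
          · exact absurd h.symm hab
          · exact h
        exact hab (pvR_antisymm (List.rel_of_pairwise_cons h1 hb) (List.rel_of_pairwise_cons h2 ha))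

-- ===== the grouping dictionary of one library =====
def pvGroups (L : List String) : PySem.Dict String (List String) := L.foldl pvStepNsA PySem.Dict.empty

theorem stepNsA_eq_pos {d : PySem.Dict String (List String)} {h : String}
    (hc : d.contains (pvNs h) = true) :
    pvStepNsA d h = d.insert (pvNs h) (d.getD (pvNs h) [] ++ [h]) := by
  unfold pvStepNsA
  rw [if_pos hc]
  rfl

theorem stepNsA_eq_neg {d : PySem.Dict String (List String)} {h : String}
    (hc : d.contains (pvNs h) = false) :
    pvStepNsA d h = (d.insert (pvNs h) []).insert (pvNs h) ([] ++ [h]) := by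
  unfold pvStepNsA
  rw [if_neg (by simp [hc])]
  unfold pvAppendNs
  rw [PySem.Dict.get?_insert_self]
  rfl

theorem get?_eq_none_of_not_contains {d : PySem.Dict String (List String)} {k : String}
    (hc : d.contains k = false) : d.get? k = none := by
  cases hg : d.get? k
  · rfl
  · rw [PySem.Dict.contains_eq_isSome_get?, hg] at hc
    exact absurd hc (by simp)

theorem stepNsA_getD (d : PySem.Dict String (List String)) (h : String) (ns : String) :
    (pvStepNsA d h).getD ns [] = if ns = pvNs h then d.getD ns [] ++ [h] else d.getD ns [] := by
  by_cases hc : d.contains (pvNs h) = true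
  · rw [stepNsA_eq_pos hc, PySem.Dict.getD_insert]
    by_cases hns : ns = pvNs h
    · rw [if_pos hns, if_pos hns, hns]
    · rw [if_neg hns, if_neg hns]
  · have hc' : d.contains (pvNs h) = false := by
      cases hv : d.contains (pvNs h)
      · rfl
      · exact absurd hv hc
    rw [stepNsA_eq_neg hc', PySem.Dict.getD_insert, PySem.Dict.getD_insert]
    by_cases hns : ns = pvNs h
    · rw [if_pos hns, if_pos hns]
      rw [show (d.getD ns [] : List String) = (d.get? ns).getD [] from rfl, hns,
        get?_eq_none_of_not_contains hc']
      rfl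
    · rw [if_neg hns, if_neg hns, if_neg hns]

theorem stepNsA_keys (d : PySem.Dict String (List String)) (h : String) :
    (pvStepNsA d h).keys = if d.contains (pvNs h) = true then d.keys else d.keys ++ [pvNs h] := by
  by_cases hc : d.contains (pvNs h) = true
  · rw [stepNsA_eq_pos hc, if_pos hc]
    exact PySem.Dict.keys_insert_of_contains d _ hc
  · have hc' : d.contains (pvNs h) = false := by
      cases hv : d.contains (pvNs h)
      · rfl
      · exact absurd hv hc
    rw [stepNsA_eq_neg hc', if_neg hc]
    have h1 : (d.insert (pvNs h) []).contains (pvNs h) = true := by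
      rw [PySem.Dict.contains_eq_isSome_get?, PySem.Dict.get?_insert_self]; rfl
    rw [PySem.Dict.keys_insert_of_contains _ _ h1, PySem.Dict.keys_insert_of_not_contains d _ hc']

theorem groups_getD (L : List String) : ∀ (d : PySem.Dict String (List String)) (ns : String),
    (L.foldl pvStepNsA d).getD ns [] = d.getD ns [] ++ L.filter (fun h => pvNs h == ns) := by
  induction L with
  | nil => intro d ns; simp
  | cons h t ih =>
    intro d ns
    rw [List.foldl_cons, ih, stepNsA_getD, List.filter_cons]
    by_cases hns : ns = pvNs h
    · rw [if_pos hns, if_pos (by simp [hns]), List.append_assoc]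
      rfl
    · rw [if_neg hns, if_neg (by simp [Ne.symm hns])]

theorem groups_mem_keys (L : List String) : ∀ (d : PySem.Dict String (List String)) (ns : String),
    ns ∈ (L.foldl pvStepNsA d).keys ↔ ns ∈ d.keys ∨ ns ∈ L.map pvNs := by
  induction L with
  | nil => intro d ns; simp
  | cons h t ih =>
    intro d ns
    rw [List.foldl_cons, ih, stepNsA_keys]
    by_cases hc : d.contains (pvNs h) = true
    · rw [if_pos hc]
      constructor
      · rintro (hk | hk)
        · exact Or.inl hk
        · exact Or.inr (by simp only [List.map_cons, List.mem_cons]; exact Or.inr hk)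
      · rintro (hk | hk)
        · exact Or.inl hk
        · rcases List.mem_map.mp hk with ⟨x, hx, rfl⟩
          rcases List.mem_cons.mp hx with rfl | hx
          · exact Or.inl (by
              rw [PySem.Dict.contains_eq_decide_mem_keys] at hc
              simpa using hc)
          · exact Or.inr (List.mem_map_of_mem hx)
    · rw [if_neg hc]
      simp only [List.mem_append, List.mem_singleton, List.map_cons, List.mem_cons]
      tauto

theorem groups_nodup_keys (L : List String) : ∀ (d : PySem.Dict String (List String)),
    d.keys.Nodup → (L.foldl pvStepNsA d).keys.Nodup := by
  induction L with
  | nil => intro d hd; exact hd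
  | cons h t ih =>
    intro d hd
    rw [List.foldl_cons]
    apply ih
    rw [stepNsA_keys]
    by_cases hc : d.contains (pvNs h) = true
    · rw [if_pos hc]; exact hd
    · rw [if_neg hc]
      have hc' : d.contains (pvNs h) = false := by
        cases hv : d.contains (pvNs h)
        · rfl
        · exact absurd hv hc
      have hnm : pvNs h ∉ d.keys := by
        rw [PySem.Dict.contains_eq_decide_mem_keys] at hc'
        simpa using hc'
      rw [List.nodup_append]
      refine ⟨hd, by simp, ?_⟩
      intro a ha b hb
      rw [List.mem_singleton] at hb
      subst hb
      exact fun hEq => hnm (hEq ▸ ha)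

-- ===== the inner-sort loop =====
theorem sortinner_getD (ks : List String) : ∀ (d : PySem.Dict String (List String)), ks.Nodup →
    ∀ ns, (ks.foldl (fun d ns => d.insert ns (PySem.List.sorted (d.getD ns []) (fun x => x) false)) d).getD ns []
      = if ns ∈ ks then PySem.List.sorted (d.getD ns []) (fun x => x) false else d.getD ns [] := by
  induction ks with
  | nil => intro d _ ns; simp
  | cons m rest ih =>
    intro d hnd ns
    rw [List.nodup_cons] at hnd
    rw [List.foldl_cons, ih _ hnd.2]
    by_cases hns : ns ∈ rest
    · rw [if_pos hns, if_pos (List.mem_cons_of_mem _ hns), PySem.Dict.getD_insert,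
        if_neg (fun hh => hnd.1 (by rw [← hh]; exact hns))]
    · rw [if_neg hns]
      by_cases hm : ns = m
      · subst hm
        rw [if_pos (by simp), PySem.Dict.getD_insert, if_pos rfl]
      · rw [if_neg (by simp [hm, hns]), PySem.Dict.getD_insert, if_neg hm]

theorem sortinner_keys (ks : List String) : ∀ (d : PySem.Dict String (List String)),
    (∀ k ∈ ks, k ∈ d.keys) →
    (ks.foldl (fun d ns => d.insert ns (PySem.List.sorted (d.getD ns []) (fun x => x) false)) d).keys = d.keys := by
  induction ks with
  | nil => intro d _; rfl
  | cons m rest ih =>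
    intro d hks
    rw [List.foldl_cons]
    have hc : d.contains m = true := by
      rw [PySem.Dict.contains_eq_decide_mem_keys]
      simpa using hks m (by simp)
    have hkeys := PySem.Dict.keys_insert_of_contains d
      (v := PySem.List.sorted (d.getD m []) (fun x => x) false) hc
    rw [ih _ (by intro k hk; rw [hkeys]; exact hks k (List.mem_cons_of_mem _ hk)), hkeys]

theorem pvSortInner_keys (d : PySem.Dict String (List String)) : (pvSortInner d).keys = d.keys :=
  sortinner_keys d.keys d (fun _ hk => hk)

theorem pvSortInner_getD (d : PySem.Dict String (List String)) (hnd : d.keys.Nodup) (ns : String) :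
    (pvSortInner d).getD ns [] = PySem.List.sorted (d.getD ns []) (fun x => x) false := by
  rw [pvSortInner, sortinner_getD d.keys d hnd ns]
  by_cases hm : ns ∈ d.keys
  · rw [if_pos hm]
  · rw [if_neg hm]
    have hg : d.get? ns = none := (PySem.Dict.get?_eq_none_iff_not_mem_keys d ns).mpr hm
    rw [show (d.getD ns [] : List String) = (d.get? ns).getD [] from rfl, hg]
    rfl

-- ===== flattening the sorted groups is the composite-key sort =====
theorem flat_perm : ∀ (ks : List String) (L : List String), ks.Nodup →
    (∀ h ∈ L, pvNs h ∈ ks) →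
    (ks.flatMap (fun ns => PySem.List.sorted (L.filter (fun h => pvNs h == ns)) (fun x => x) false)).Perm L := by
  intro ks
  induction ks with
  | nil =>
    intro L _ hcov
    have : L = [] := List.eq_nil_iff_forall_not_mem.mpr (fun x hx => by simpa using hcov x hx)
    simp [this]
  | cons k rest ih =>
    intro L hnd hcov
    rw [List.nodup_cons] at hnd
    rw [List.flatMap_cons]
    have hflat : rest.flatMap (fun ns => PySem.List.sorted (L.filter (fun h => pvNs h == ns)) (fun x => x) false)
        = rest.flatMap (fun ns => PySem.List.sorted ((L.filter (fun h => !(pvNs h == k))).filter (fun h => pvNs h == ns)) (fun x => x) false) := by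
      apply List.flatMap_congr
      intro ns hns
      rw [List.filter_filter]
      have hnsk : (ns == k) = false := beq_eq_false_iff_ne.mpr (fun hh => hnd.1 (hh ▸ hns))
      congr 1
      apply List.filter_congr
      intro x _
      by_cases hx : pvNs x = ns
      · rw [hx]
        rw [show ((ns == ns) : Bool) = true from by simp]
        rw [show ((ns == k) : Bool) = false from hnsk]
        rfl
      · have hxf : (pvNs x == ns) = false := beq_eq_false_iff_ne.mpr hx
        rw [hxf]
        rfl
    rw [hflat]
    have hperm2 := ih (L.filter (fun h => !(pvNs h == k))) hnd.2 (by
      intro h hh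
      rw [List.mem_filter] at hh
      rcases List.mem_cons.mp (hcov h hh.1) with hk | hk
      · exfalso
        have h2 := hh.2
        simp [hk] at h2
      · exact hk)
    have hperm1 : (PySem.List.sorted (L.filter (fun h => pvNs h == k)) (fun x => x) false).Perm
        (L.filter (fun h => pvNs h == k)) := PySem.List.sorted_perm _ _ _
    exact (hperm1.append hperm2).trans (List.filter_append_perm _ L)

theorem flat_pairwise : ∀ (ks : List String) (L : List String), ks.Pairwise (· < ·) →
    (ks.flatMap (fun ns => PySem.List.sorted (L.filter (fun h => pvNs h == ns)) (fun x => x) false)).Pairwise pvR := by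
  intro ks
  induction ks with
  | nil => intro L _; simp
  | cons k rest ih =>
    intro L hpw
    rw [List.pairwise_cons] at hpw
    rw [List.flatMap_cons, List.pairwise_append]
    refine ⟨?_, ih L hpw.2, ?_⟩
    · apply List.Pairwise.imp_of_mem ?_ (PySem.List.sorted_pairwise (L.filter (fun h => pvNs h == k)) (fun x => x))
      intro a b ha hb hab
      have hka : pvNs a = k := by
        have := (List.mem_filter.mp ((PySem.List.mem_sorted _ _ _ a).mp ha)).2
        simpa using this
      have hkb : pvNs b = k := by
        have := (List.mem_filter.mp ((PySem.List.mem_sorted _ _ _ b).mp hb)).2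
        simpa using this
      rw [pvR_iff]
      exact Or.inr ⟨hka.trans hkb.symm, hab⟩
    · intro a ha b hb
      have hka : pvNs a = k := by
        have := (List.mem_filter.mp ((PySem.List.mem_sorted _ _ _ a).mp ha)).2
        simpa using this
      rcases List.mem_flatMap.mp hb with ⟨ns, hns, hbmem⟩
      have hkb : pvNs b = ns := by
        have := (List.mem_filter.mp ((PySem.List.mem_sorted _ _ _ b).mp hbmem)).2
        simpa using this
      rw [pvR_iff]
      exact Or.inl (by rw [hka, hkb]; exact hpw.1 ns hns)

theorem flat_eq_sorted2 (ks : List String) (L : List String) (hnd : ks.Nodup)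
    (hpw : ks.Pairwise (· < ·)) (hcov : ∀ h ∈ L, pvNs h ∈ ks) :
    ks.flatMap (fun ns => PySem.List.sorted (L.filter (fun h => pvNs h == ns)) (fun x => x) false)
      = PySem.List.sorted2 L pvNs (fun x => x) false := by
  apply pvR_uniq
  · exact (flat_perm ks L hnd hcov).trans (PySem.List.sorted2_perm L pvNs (fun x => x) false).symm
  · exact flat_pairwise ks L hpw
  · exact sorted2_pairwise L

-- A's complete per-library result is the composite-key sort of that library's headers
theorem perlib_eq (L : List String) :
    (PySem.List.sorted (pvSortInner (pvGroups L)).keys (fun x => x) false).flatMap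
        (fun ns => (pvSortInner (pvGroups L)).getD ns [])
      = PySem.List.sorted2 L pvNs (fun x => x) false := by
  have hnd : (pvGroups L).keys.Nodup := groups_nodup_keys L PySem.Dict.empty PySem.Dict.nodup_keys_empty
  have hks_perm : (PySem.List.sorted (pvGroups L).keys (fun x => x) false).Perm (pvGroups L).keys :=
    PySem.List.sorted_perm _ _ _
  have hksnd : (PySem.List.sorted (pvGroups L).keys (fun x => x) false).Nodup :=
    (hks_perm.nodup_iff).mpr hnd
  have hkspw : (PySem.List.sorted (pvGroups L).keys (fun x => x) false).Pairwise (· < ·) := by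
    have h1 := PySem.List.sorted_pairwise (pvGroups L).keys (fun x => x)
    exact (h1.and hksnd).imp (fun hab => lt_of_le_of_ne hab.1 hab.2)
  have hcov : ∀ h ∈ L, pvNs h ∈ PySem.List.sorted (pvGroups L).keys (fun x => x) false := by
    intro h hh
    rw [PySem.List.mem_sorted, pvGroups, groups_mem_keys]
    exact Or.inr (List.mem_map_of_mem hh)
  rw [pvSortInner_keys]
  have hbody : (PySem.List.sorted (pvGroups L).keys (fun x => x) false).flatMap
        (fun ns => (pvSortInner (pvGroups L)).getD ns [])
      = (PySem.List.sorted (pvGroups L).keys (fun x => x) false).flatMap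
        (fun ns => PySem.List.sorted (L.filter (fun h => pvNs h == ns)) (fun x => x) false) := by
    apply List.flatMap_congr
    intro ns _
    rw [pvSortInner_getD (pvGroups L) hnd ns, pvGroups, groups_getD, PySem.Dict.getD_empty,
      List.nil_append]
  rw [hbody]
  exact flat_eq_sorted2 _ L hksnd hkspw hcov

-- ===== case lemmas for one step of A's classification loop =====
theorem stepA_nosplit {st : PySem.Dict String (PySem.Dict String (List String)) × List String × List String}
    {h : String} (hl : ¬ 1 < (pvParts h).length) :
    pvStepA st h = (st.1, st.2.1 ++ [h], st.2.2) := by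
  unfold pvStepA
  rw [if_neg hl]

theorem stepA_lib {st : PySem.Dict String (PySem.Dict String (List String)) × List String × List String}
    {h : String} (hl : 1 < (pvParts h).length) (hm : (pvParts h).headD "" ∈ pvLibNames) :
    pvStepA st h = (st.1.insert ((pvParts h).headD "")
      (pvStepNsA ((st.1.get? ((pvParts h).headD "")).getD PySem.Dict.empty) h), st.2.1, st.2.2) := by
  unfold pvStepA
  rw [if_pos hl, if_pos hm]

theorem stepA_other {st : PySem.Dict String (PySem.Dict String (List String)) × List String × List String}
    {h : String} (hl : 1 < (pvParts h).length) (hm : (pvParts h).headD "" ∉ pvLibNames) :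
    pvStepA st h = (st.1, st.2.1, st.2.2 ++ [h]) := by
  unfold pvStepA
  rw [if_pos hl, if_neg hm]

-- ===== fold invariants of A's classification loop =====
theorem foldA_stl (hs : List String) : ∀ o s t,
    (hs.foldl pvStepA (o, (s, t))).2.1 = s ++ hs.filter pvIsStl := by
  induction hs with
  | nil => intro o s t; simp
  | cons h rest ih =>
    intro o s t
    rw [List.foldl_cons, List.filter_cons]
    by_cases hl : 1 < (pvParts h).length
    · rw [isStl_f hl, if_neg (by simp)]
      by_cases hm : (pvParts h).headD "" ∈ pvLibNames
      · rw [stepA_lib hl hm, ih]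
      · rw [stepA_other hl hm, ih]
    · rw [isStl_t hl, if_pos rfl, stepA_nosplit hl, ih, List.append_assoc]
      rfl

theorem foldA_other (hs : List String) : ∀ o s t,
    (hs.foldl pvStepA (o, (s, t))).2.2 = t ++ hs.filter pvIsOther := by
  induction hs with
  | nil => intro o s t; simp
  | cons h rest ih =>
    intro o s t
    rw [List.foldl_cons, List.filter_cons]
    by_cases hl : 1 < (pvParts h).length
    · by_cases hm : (pvParts h).headD "" ∈ pvLibNames
      · rw [isOther_f_mem hm, if_neg (by simp), stepA_lib hl hm, ih]
      · rw [isOther_t hl hm, if_pos rfl, stepA_other hl hm, ih, List.append_assoc]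
        rfl
    · rw [isOther_f_len hl, if_neg (by simp), stepA_nosplit hl, ih]

theorem foldA_lib (hs : List String) : ∀ (o : PySem.Dict String (PySem.Dict String (List String)))
    (s t : List String) (name : String), name ∈ pvLibNames → o.contains name = true →
    (hs.foldl pvStepA (o, (s, t))).1.get? name
      = some ((hs.filter (pvIsLib name)).foldl pvStepNsA ((o.get? name).getD PySem.Dict.empty)) := by
  induction hs with
  | nil =>
    intro o s t name _ hc
    rw [PySem.Dict.contains_eq_isSome_get?] at hc
    cases hg : o.get? name with
    | none => rw [hg] at hc; exact absurd hc (by simp)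
    | some v => rw [List.filter_nil, List.foldl_nil, hg]; rfl
  | cons h rest ih =>
    intro o s t name hname hc
    rw [List.foldl_cons, List.filter_cons]
    by_cases hl : 1 < (pvParts h).length
    · by_cases hm : (pvParts h).headD "" ∈ pvLibNames
      · rw [stepA_lib hl hm]
        by_cases hn : (pvParts h).headD "" = name
        · rw [isLib_t hl hn, if_pos rfl]
          rw [ih _ _ _ _ hname (by
            rw [hn, PySem.Dict.contains_eq_isSome_get?, PySem.Dict.get?_insert_self]; rfl)]
          rw [hn, PySem.Dict.get?_insert_self]
          simp only [Option.getD_some, List.foldl_cons]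
        · rw [isLib_f_head hn, if_neg (by simp)]
          rw [ih _ _ _ _ hname (by
            rw [PySem.Dict.contains_eq_isSome_get?,
              PySem.Dict.get?_insert_of_ne _ _ (fun hh => hn hh.symm),
              ← PySem.Dict.contains_eq_isSome_get?]
            exact hc)]
          rw [PySem.Dict.get?_insert_of_ne _ _ (fun hh => hn hh.symm)]
      · have hfil : pvIsLib name h = false := isLib_f_head (fun hh => hm (hh ▸ hname))
        rw [hfil, if_neg (by simp), stepA_other hl hm]
        exact ih _ _ _ _ hname hc
    · rw [isLib_f_len hl, if_neg (by simp), stepA_nosplit hl]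
      exact ih _ _ _ _ hname hc

-- ===== A's final sorting loop over libraries =====
theorem sortloop_get?_not_mem (names : List String) :
    ∀ (o : PySem.Dict String (PySem.Dict String (List String))) (n : String), n ∉ names →
    (names.foldl (fun o l => o.insert l (pvSortInner ((o.get? l).getD PySem.Dict.empty))) o).get? n = o.get? n := by
  induction names with
  | nil => intro o n _; rfl
  | cons m rest ih =>
    intro o n hn
    rw [List.foldl_cons, ih _ _ (fun hh => hn (List.mem_cons_of_mem _ hh)),
      PySem.Dict.get?_insert_of_ne _ _ (fun hh => hn (by rw [hh]; simp))]

theorem sortloop_get? (names : List String) :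
    ∀ (o : PySem.Dict String (PySem.Dict String (List String))), names.Nodup → ∀ n ∈ names,
    (names.foldl (fun o l => o.insert l (pvSortInner ((o.get? l).getD PySem.Dict.empty))) o).get? n
      = some (pvSortInner ((o.get? n).getD PySem.Dict.empty)) := by
  induction names with
  | nil => intro o _ n hn; simp at hn
  | cons m rest ih =>
    intro o hnd n hn
    rw [List.nodup_cons] at hnd
    rw [List.foldl_cons]
    rcases List.mem_cons.mp hn with rfl | hn
    · rw [sortloop_get?_not_mem rest _ n hnd.1, PySem.Dict.get?_insert_self]
    · rw [ih _ hnd.2 n hn, PySem.Dict.get?_insert_of_ne _ _ (fun hh => hnd.1 (by rw [← hh]; exact hn))]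

-- ===== case lemmas for one step of B's classification loop =====
theorem stepB_nosplit {st : PySem.Dict String (List String) × List String × List String}
    {h : String} (hl : ¬ 1 < (pvParts h).length) :
    pvStepB st h = (st.1, st.2.1 ++ [h], st.2.2) := by
  unfold pvStepB
  rw [if_neg hl]

theorem stepB_lib {st : PySem.Dict String (List String) × List String × List String}
    {h : String} (hl : 1 < (pvParts h).length) (hc : st.1.contains ((pvParts h).headD "") = true) :
    pvStepB st h = (st.1.insert ((pvParts h).headD "")
      (st.1.getD ((pvParts h).headD "") [] ++ [h]), st.2.1, st.2.2) := by
  unfold pvStepB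
  rw [if_pos hl, if_pos hc]

theorem stepB_other {st : PySem.Dict String (List String) × List String × List String}
    {h : String} (hl : 1 < (pvParts h).length) (hc : st.1.contains ((pvParts h).headD "") = false) :
    pvStepB st h = (st.1, st.2.1, st.2.2 ++ [h]) := by
  unfold pvStepB
  rw [if_pos hl, if_neg (by rw [hc]; simp)]

-- ===== fold invariants of B's classification loop =====
theorem pv_contains_insert {d : PySem.Dict String (List String)} {k : String}
    (v : List String) (hc : d.contains k = true) :
    ∀ k', (d.insert k v).contains k' = d.contains k' := by
  intro k'
  by_cases hk : k' = k
  · subst hk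
    rw [PySem.Dict.contains_eq_isSome_get?, PySem.Dict.get?_insert_self, hc]; rfl
  · rw [PySem.Dict.contains_eq_isSome_get?, PySem.Dict.get?_insert_of_ne _ _ hk,
      ← PySem.Dict.contains_eq_isSome_get?]

theorem foldB_stl (hs : List String) : ∀ o s t,
    (hs.foldl pvStepB (o, (s, t))).2.1 = s ++ hs.filter pvIsStl := by
  induction hs with
  | nil => intro o s t; simp
  | cons h rest ih =>
    intro o s t
    rw [List.foldl_cons, List.filter_cons]
    by_cases hl : 1 < (pvParts h).length
    · rw [isStl_f hl, if_neg (by simp)]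
      cases hc : o.contains ((pvParts h).headD "")
      · rw [stepB_other hl hc, ih]
      · rw [stepB_lib hl hc, ih]
    · rw [isStl_t hl, if_pos rfl, stepB_nosplit hl, ih, List.append_assoc]
      rfl

theorem foldB_other (hs : List String) : ∀ o s t, (∀ k, o.contains k = pvLibNames.contains k) →
    (hs.foldl pvStepB (o, (s, t))).2.2 = t ++ hs.filter pvIsOther := by
  induction hs with
  | nil => intro o s t _; simp
  | cons h rest ih =>
    intro o s t hk
    rw [List.foldl_cons, List.filter_cons]
    by_cases hl : 1 < (pvParts h).length
    · cases hc : o.contains ((pvParts h).headD "")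
      · have hm : (pvParts h).headD "" ∉ pvLibNames := by
          intro hm
          rw [hk, List.contains_iff_mem.mpr hm] at hc
          exact absurd hc (by simp)
        rw [isOther_t hl hm, if_pos rfl, stepB_other hl hc, ih _ _ _ hk, List.append_assoc]
        rfl
      · have hm : (pvParts h).headD "" ∈ pvLibNames := by
          rw [hk] at hc
          exact List.contains_iff_mem.mp hc
        rw [isOther_f_mem hm, if_neg (by simp), stepB_lib hl hc, ih _ _ _ (fun k' => by
          rw [pv_contains_insert _ hc k']
          exact hk k')]
    · rw [isOther_f_len hl, if_neg (by simp), stepB_nosplit hl, ih _ _ _ hk]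

theorem foldB_lib (hs : List String) : ∀ (o : PySem.Dict String (List String)) (s t : List String)
    (name : String), (∀ k, o.contains k = pvLibNames.contains k) → name ∈ pvLibNames →
    (hs.foldl pvStepB (o, (s, t))).1.getD name []
      = o.getD name [] ++ hs.filter (pvIsLib name) := by
  induction hs with
  | nil => intro o s t name _ _; simp
  | cons h rest ih =>
    intro o s t name hk hname
    rw [List.foldl_cons, List.filter_cons]
    by_cases hl : 1 < (pvParts h).length
    · cases hc : o.contains ((pvParts h).headD "")
      · have hfil : pvIsLib name h = false := by
          apply isLib_f_head
          intro hh
          rw [hh, hk, List.contains_iff_mem.mpr hname] at hc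
          exact absurd hc (by simp)
        rw [hfil, if_neg (by simp), stepB_other hl hc]
        exact ih _ _ _ _ hk hname
      · rw [stepB_lib hl hc]
        have hk' : ∀ k', ((o.insert ((pvParts h).headD "")
            (o.getD ((pvParts h).headD "") [] ++ [h])).contains k') = pvLibNames.contains k' := by
          intro k'
          rw [pv_contains_insert _ hc k']
          exact hk k'
        rw [ih _ _ _ _ hk' hname]
        by_cases hn : (pvParts h).headD "" = name
        · rw [isLib_t hl hn, if_pos rfl, hn, PySem.Dict.getD_insert, if_pos rfl, List.append_assoc]
          rfl
        · rw [isLib_f_head hn, if_neg (by simp), PySem.Dict.getD_insert,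
            if_neg (fun hh => hn hh.symm)]
    · rw [isLib_f_len hl, if_neg (by simp), stepB_nosplit hl]
      exact ih _ _ _ _ hk hname

-- ===== literal facts about the two initial dictionaries =====
theorem initA_facts : ∀ name ∈ pvLibNames,
    (pvLibNames.foldl (fun d name => d.insert name PySem.Dict.empty)
      (PySem.Dict.empty : PySem.Dict String (PySem.Dict String (List String)))).get? name
        = some PySem.Dict.empty ∧
    (pvLibNames.foldl (fun d name => d.insert name PySem.Dict.empty)
      (PySem.Dict.empty : PySem.Dict String (PySem.Dict String (List String)))).contains name = true := by
  decide

theorem initB_getD : ∀ name ∈ pvLibNames,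
    (pvLibNames.foldl (fun d name => d.insert name [])
      (PySem.Dict.empty : PySem.Dict String (List String))).getD name [] = [] := by decide

theorem initB_contains : ∀ k,
    (pvLibNames.foldl (fun d name => d.insert name [])
      (PySem.Dict.empty : PySem.Dict String (List String))).contains k = pvLibNames.contains k := by
  intro k
  rw [PySem.Dict.contains_eq_decide_mem_keys]
  have hkeys : (pvLibNames.foldl (fun d name => d.insert name [])
      (PySem.Dict.empty : PySem.Dict String (List String))).keys = pvLibNames := by decide
  rw [hkeys]
  by_cases hk : k ∈ pvLibNames
  · rw [List.contains_iff_mem.mpr hk]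
    simp [hk]
  · simp only [hk, decide_false]
    cases hc : pvLibNames.contains k
    · rfl
    · exact absurd (List.contains_iff_mem.mp hc) hk

theorem pvLibNames_nodup : pvLibNames.Nodup := by decide

-- what each port computes, in common form
theorem outerA_fold (headers : List String) : ∀ (names : List String)
    (o : PySem.Dict String (PySem.Dict String (List String))),
    (∀ n ∈ names, o.get? n = some (pvSortInner (pvGroups (headers.filter (pvIsLib n))))) → ∀ acc,
    names.foldl (fun acc libname =>
        (PySem.List.sorted ((o.get? libname).getD PySem.Dict.empty).keys (fun x => x) false).foldl
          (fun acc ns => acc ++ ((o.get? libname).getD PySem.Dict.empty).getD ns []) acc) acc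
      = acc ++ names.flatMap
          (fun n => PySem.List.sorted2 (headers.filter (pvIsLib n)) pvNs (fun x => x) false) := by
  intro names
  induction names with
  | nil => intro o _ acc; simp
  | cons m rest ih =>
    intro o hchar acc
    rw [List.foldl_cons, List.flatMap_cons]
    have hbody : (PySem.List.sorted ((o.get? m).getD PySem.Dict.empty).keys (fun x => x) false).foldl
          (fun acc ns => acc ++ ((o.get? m).getD PySem.Dict.empty).getD ns []) acc
        = acc ++ PySem.List.sorted2 (headers.filter (pvIsLib m)) pvNs (fun x => x) false := by
      rw [hchar m (by simp)]
      simp only [Option.getD_some]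
      rw [PySem.List.foldl_append_eq_flatMap, perlib_eq]
    rw [hbody, ih o (fun n hn => hchar n (by simp [hn])), List.append_assoc]

theorem outerB_fold (headers : List String) : ∀ (names : List String)
    (o : PySem.Dict String (List String)),
    (∀ n ∈ names, o.getD n [] = headers.filter (pvIsLib n)) → ∀ acc,
    names.foldl (fun acc name =>
        acc ++ PySem.List.sorted2 (o.getD name []) pvNs (fun x => x) false) acc
      = acc ++ names.flatMap
          (fun n => PySem.List.sorted2 (headers.filter (pvIsLib n)) pvNs (fun x => x) false) := by
  intro names
  induction names with
  | nil => intro o _ acc; simp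
  | cons m rest ih =>
    intro o hchar acc
    rw [List.foldl_cons, List.flatMap_cons]
    rw [hchar m (by simp), ih o (fun n hn => hchar n (by simp [hn])), List.append_assoc]

theorem A_eq (headers : List String) :
    group_and_sort_headers headers
      = (pvLibNames.flatMap (fun name =>
            PySem.List.sorted2 (headers.filter (pvIsLib name)) pvNs (fun x => x) false)
          ++ PySem.List.sorted (headers.filter pvIsStl) (fun x => x) false)
          ++ PySem.List.sorted (headers.filter pvIsOther) (fun x => x) false := by
  have hchar : ∀ n ∈ pvLibNames,
      (pvLibNames.foldl
        (fun o libname => o.insert libname (pvSortInner ((o.get? libname).getD PySem.Dict.empty)))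
        (headers.foldl pvStepA
          (pvLibNames.foldl (fun d name => d.insert name PySem.Dict.empty) PySem.Dict.empty,
            ([], []))).1).get? n
      = some (pvSortInner (pvGroups (headers.filter (pvIsLib n)))) := by
    intro n hn
    rw [sortloop_get? pvLibNames _ pvLibNames_nodup n hn,
      foldA_lib headers _ [] [] n hn (initA_facts n hn).2, (initA_facts n hn).1]
    simp only [Option.getD_some]
    rfl
  unfold group_and_sort_headers pvGroupHeaders
  simp only [foldA_stl, foldA_other, List.nil_append]
  rw [outerA_fold headers pvLibNames _ hchar [], List.nil_append]

theorem B_eq (headers : List String) :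
    group_and_sort_headers_alt headers
      = (pvLibNames.flatMap (fun name =>
            PySem.List.sorted2 (headers.filter (pvIsLib name)) pvNs (fun x => x) false)
          ++ PySem.List.sorted (headers.filter pvIsStl) (fun x => x) false)
          ++ PySem.List.sorted (headers.filter pvIsOther) (fun x => x) false := by
  have hchar : ∀ n ∈ pvLibNames,
      (headers.foldl pvStepB
        (pvLibNames.foldl (fun d name => d.insert name []) PySem.Dict.empty, ([], []))).1.getD n []
      = headers.filter (pvIsLib n) := by
    intro n hn
    rw [foldB_lib headers _ [] [] n initB_contains hn, initB_getD n hn, List.nil_append]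
  unfold group_and_sort_headers_alt
  simp only [foldB_stl, foldB_other headers _ _ _ initB_contains, List.nil_append]
  rw [outerB_fold headers pvLibNames _ hchar [], List.nil_append]

theorem final_eq (headers : List String) :
    group_and_sort_headers headers = group_and_sort_headers_alt headers := by
  rw [A_eq, B_eq]

-- ===== VERDICT (by name: the statement is the Claim_ definition above) =====
theorem group_and_sort_headers_spec : Claim_equal_group_and_sort_headers := by
  intro headers _
  unfold Spec_group_and_sort_headers
  exact final_eq headers
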